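-- pv_equiv track=rewrite | github.com/xcd1234/Fall2020_MSiA400_GannettPeak | Code/Creating Features/XimpAndXint.py | blankdf
-- ===== SOURCE A (Python) =====
-- def blankdf(ticks):
--     '''
--     Creates lists for blank dataframe in desired format for modeling without key variable based on tickers
--     Input: List of tickers
--     Output: Lists of tickers by available months and years in dataset
--
--     '''
--     months = ['01','02','03','04','05','06','07','08','09','10','11','12']
--     years = ['2016','2017','2018','2019','2020']
--     monthlist = []
--     yearlist = []
--     tlist = []
--
--     for t in ticks:
--         for i in range(5):
--             if i == 0:
--                 for j in range(9):
--                     monthlist.append(months[j+3])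
--                     yearlist.append(years[i])
--                     tlist.append(t)
--             else:
--                 for j in range(12):
--                     if i == 4:
--                         monthlist.append('01')
--                         yearlist.append('2020')
--                         tlist.append(t)
--                         break
--                     else:
--                         monthlist.append(months[j])
--                         tlist.append(t)
--                     yearlist.append(years[i])
--
--     return tlist, monthlist, yearlist
-- ===== SOURCE B (Python) =====
-- def blankdf(ticks):
--     months = ['01','02','03','04','05','06','07','08','09','10','11','12']
--     # one shared template of (month, year) pairs: 2016 from April, full 2017-2019, January 2020
--     template = [(m, '2016') for m in months[3:]]
--     template += [(m, y) for y in ('2017', '2018', '2019') for m in months]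
--     template += [('01', '2020')]
--     tlist, monthlist, yearlist = [], [], []
--     for t in ticks:
--         for m, y in template:
--             tlist.append(t)
--             monthlist.append(m)
--             yearlist.append(y)
--     return tlist, monthlist, yearlist
-- ===== Notes on version B (the rewrite author's own statement) =====
-- stated objective: simpler
-- what changed: B precomputes one flat (month, year) template list shared by all tickers and replicates it per ticker in a single uniform loop, instead of A's per-ticker nested year-index loops with branching and a break.
import Mathlib
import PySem

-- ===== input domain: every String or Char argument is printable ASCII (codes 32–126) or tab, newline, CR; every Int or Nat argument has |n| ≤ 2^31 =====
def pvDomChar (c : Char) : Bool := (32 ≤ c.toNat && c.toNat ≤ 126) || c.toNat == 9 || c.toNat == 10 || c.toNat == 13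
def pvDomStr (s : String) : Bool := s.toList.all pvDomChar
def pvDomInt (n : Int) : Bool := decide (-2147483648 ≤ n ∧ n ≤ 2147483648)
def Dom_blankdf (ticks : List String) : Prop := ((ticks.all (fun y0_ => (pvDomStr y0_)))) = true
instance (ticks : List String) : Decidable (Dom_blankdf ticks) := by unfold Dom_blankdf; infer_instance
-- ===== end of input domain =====

-- B precomputes the shared (month, year) template once and replicates it per ticker,
-- replacing A's per-ticker branching year-group loops (objective: simpler).

-- ===== PORT A =====
def pvMonthsA : List String := ["01","02","03","04","05","06","07","08","09","10","11","12"]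
def pvYearsA : List String := ["2016","2017","2018","2019","2020"]

-- inner j-loop for the else branch (i ≠ 0); models Python's `break` when i == 4 by
-- stopping the recursion after the first iteration. State: (monthlist, yearlist, tlist).
def pvLoopJElse (t : String) (i : Int) :
    List Int → List String × List String × List String → List String × List String × List String
  | [], st => st
  | j :: rest, (ml, yl, tl) =>
    if i == 4 then
      (ml ++ ["01"], yl ++ ["2020"], tl ++ [t])   -- append then break
    else
      pvLoopJElse t i rest
        (ml ++ [(PySem.List.pyGet? pvMonthsA j).getD ""],
         yl ++ [(PySem.List.pyGet? pvYearsA i).getD ""],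
         tl ++ [t])

-- body of `for i in range(5)`
def pvLoopI (t : String) (st : List String × List String × List String) (i : Int) :
    List String × List String × List String :=
  if i == 0 then
    (PySem.List.pyRange 0 9 1).foldl (fun (st' : List String × List String × List String) j =>
      (st'.1 ++ [(PySem.List.pyGet? pvMonthsA (j + 3)).getD ""],
       st'.2.1 ++ [(PySem.List.pyGet? pvYearsA i).getD ""],
       st'.2.2 ++ [t])) st
  else
    pvLoopJElse t i (PySem.List.pyRange 0 12 1) st

def blankdf (ticks : List String) : List String × List String × List String :=
  let st := ticks.foldl (fun st t => (PySem.List.pyRange 0 5 1).foldl (pvLoopI t) st)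
    ([], [], [])
  (st.2.2, st.1, st.2.1)

-- ===== PORT B =====
def pvMonthsB : List String := ["01","02","03","04","05","06","07","08","09","10","11","12"]

def pvTemplateB : List (String × String) :=
  (PySem.List.slice pvMonthsB (some 3) none).map (fun m => (m, "2016"))
    ++ (["2017", "2018", "2019"].flatMap (fun y => pvMonthsB.map (fun m => (m, y))))
    ++ [("01", "2020")]

def blankdf_alt (ticks : List String) : List String × List String × List String :=
  ticks.foldl (fun (st : List String × List String × List String) t =>
    pvTemplateB.foldl (fun (st' : List String × List String × List String) my =>
      (st'.1 ++ [t], st'.2.1 ++ [my.1], st'.2.2 ++ [my.2])) st)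
    ([], [], [])

-- ===== PRECONDITION & SPEC =====
def Spec_blankdf (ticks : List String) (out : List String × List String × List String) : Prop := out = blankdf_alt ticks
instance (ticks : List String) (out : List String × List String × List String) : Decidable (Spec_blankdf ticks out) := by unfold Spec_blankdf; infer_instance

-- ===== CLAIM (what is proved, stated in full; the proofs are below) =====
def Claim_equal_blankdf : Prop := ∀ (ticks : List String), Dom_blankdf ticks → Spec_blankdf ticks (blankdf ticks)

-- ===== LEMMAS AND PROOFS =====

-- the per-ticker chunk both programs append, as explicit lists
def pvChunkM : List String := pvTemplateB.map Prod.fst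
def pvChunkY : List String := pvTemplateB.map Prod.snd

lemma pvRange5 : PySem.List.pyRange 0 5 1 = [0, 1, 2, 3, 4] := by decide
lemma pvRange9 : PySem.List.pyRange 0 9 1 = [0, 1, 2, 3, 4, 5, 6, 7, 8] := by decide
lemma pvRange12 : PySem.List.pyRange 0 12 1 = [0, 1, 2, 3, 4, 5, 6, 7, 8, 9, 10, 11] := by decide

lemma pvStepA_eq (t : String) (ml yl tl : List String) :
    (PySem.List.pyRange 0 5 1).foldl (pvLoopI t) (ml, yl, tl)
      = (ml ++ pvChunkM, yl ++ pvChunkY, tl ++ List.replicate 46 t) := by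
  simp [pvRange5, pvRange9, pvRange12, pvLoopI, pvLoopJElse,
    PySem.List.pyGet?, PySem.List.pyIdx?, pvMonthsA, pvYearsA,
    pvChunkM, pvChunkY, pvTemplateB, pvMonthsB, PySem.List.slice,
    List.replicate]

lemma pvStepB_eq (t : String) (ml yl tl : List String) :
    pvTemplateB.foldl (fun (st' : List String × List String × List String) my =>
      (st'.1 ++ [t], st'.2.1 ++ [my.1], st'.2.2 ++ [my.2])) (tl, ml, yl)
      = (tl ++ List.replicate 46 t, ml ++ pvChunkM, yl ++ pvChunkY) := by
  simp [pvTemplateB, pvMonthsB, PySem.List.slice, pvChunkM, pvChunkY, List.replicate]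

lemma pv_main (ticks : List String) :
    ∀ ml yl tl : List String,
      (ticks.foldl (fun st t => (PySem.List.pyRange 0 5 1).foldl (pvLoopI t) st) (ml, yl, tl))
        = (let (tl', ml', yl') :=
              ticks.foldl (fun (st : List String × List String × List String) t =>
                pvTemplateB.foldl (fun (st' : List String × List String × List String) my =>
                  (st'.1 ++ [t], st'.2.1 ++ [my.1], st'.2.2 ++ [my.2])) st) (tl, ml, yl)
           (ml', yl', tl')) := by
  induction ticks with
  | nil => intro ml yl tl; simp
  | cons t rest ih =>
    intro ml yl tl
    simp only [List.foldl_cons, pvStepA_eq, pvStepB_eq]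
    exact ih _ _ _

-- ===== VERDICT (by name: the statement is the Claim_ definition above) =====
theorem blankdf_spec : Claim_equal_blankdf := by
  intro ticks _
  unfold Spec_blankdf blankdf blankdf_alt
  have h := pv_main ticks [] [] []
  rw [h]
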